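-- pv_equiv track=rewrite | github.com/guserav/LED10_10_48V_Board | calculate_resistor_network.py | count_dip_switch_networks_4
-- ===== SOURCE A (Python) =====
-- def count_dip_switch_networks_4(resistors):
--     r_count = len(resistors)
--     count = 0
--     for i in range(r_count):
--         for j in range(r_count - i):
--             for k in range(r_count - j - i):
--                 m = r_count - k - i - j
--                 count += m
--     return r_count * count
-- ===== SOURCE B (Python) =====
-- def count_dip_switch_networks_4(resistors):
--     n = len(resistors)
--     return n * (n * (n + 1) * (n + 2) * (n + 3) // 24)
-- ===== Notes on version B (the rewrite author's own statement) =====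
-- stated objective: faster
-- what changed: Replaced the O(n^3) triple nested loop over (i,j,k) by the closed-form polynomial n*(n*(n+1)*(n+2)*(n+3)//24) derived from the nested prefix-sum identity (hockey-stick).
import Mathlib
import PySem

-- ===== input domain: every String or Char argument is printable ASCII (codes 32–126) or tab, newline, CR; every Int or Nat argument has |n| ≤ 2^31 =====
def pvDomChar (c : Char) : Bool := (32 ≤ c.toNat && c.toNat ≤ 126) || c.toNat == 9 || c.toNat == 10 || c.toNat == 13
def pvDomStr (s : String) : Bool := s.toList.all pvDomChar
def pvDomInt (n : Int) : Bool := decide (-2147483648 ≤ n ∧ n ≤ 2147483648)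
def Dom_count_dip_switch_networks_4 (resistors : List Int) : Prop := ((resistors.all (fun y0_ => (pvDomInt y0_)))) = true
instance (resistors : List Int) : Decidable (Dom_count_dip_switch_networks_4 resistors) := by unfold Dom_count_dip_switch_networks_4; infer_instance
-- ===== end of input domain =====

-- B replaces A's O(n^3) triple loop by the closed-form polynomial n*(n*(n+1)*(n+2)*(n+3)//24).

-- ===== PORT A =====
def count_dip_switch_networks_4 (resistors : List Int) : Int :=
  let r_count : Int := resistors.length
  let count : Int := 0
  let count :=
    (PySem.List.pyRange 0 r_count 1).foldl (fun count i =>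
      (PySem.List.pyRange 0 (r_count - i) 1).foldl (fun count j =>
        (PySem.List.pyRange 0 (r_count - j - i) 1).foldl (fun count k =>
          count + (r_count - k - i - j)) count) count) count
  r_count * count

-- ===== PORT B =====
def count_dip_switch_networks_4_alt (resistors : List Int) : Int :=
  let n : Int := resistors.length
  n * PySem.Int.floordiv (n * (n + 1) * (n + 2) * (n + 3)) 24

-- ===== PRECONDITION & SPEC =====
def Spec_count_dip_switch_networks_4 (resistors : List Int) (out : Int) : Prop := out = count_dip_switch_networks_4_alt resistors
instance (resistors : List Int) (out : Int) : Decidable (Spec_count_dip_switch_networks_4 resistors out) := by unfold Spec_count_dip_switch_networks_4; infer_instance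

-- ===== CLAIM (what is proved, stated in full; the proofs are below) =====
def Claim_equal_count_dip_switch_networks_4 : Prop := ∀ (resistors : List Int), Dom_count_dip_switch_networks_4 resistors → Spec_count_dip_switch_networks_4 resistors (count_dip_switch_networks_4 resistors)

-- ===== LEMMAS AND PROOFS =====

-- Sum of f(s - j) for j in range(s)
def pvMirrorSum (f : Int → Int) (s : Int) : Int :=
  ((PySem.List.pyRange 0 s 1).map (fun j => f (s - j))).sum

theorem pvMirrorSum_step (f : Int → Int) (s : Int) (hs : 0 ≤ s) :
    pvMirrorSum f (s + 1) = f (s + 1) + pvMirrorSum f s := by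
  unfold pvMirrorSum
  rw [PySem.List.pyRange_one_cons (by omega)]
  simp only [List.map_cons, List.sum_cons, sub_zero]
  congr 1
  have h0 : (0:Int) + 1 = 1 := by norm_num
  rw [h0, PySem.List.pyRange_one 1 (s+1), PySem.List.pyRange_one 0 s]
  have h2 : (s + 1 - 1).toNat = (s - 0).toNat := by omega
  rw [h2]
  simp only [List.map_map]
  apply congrArg
  apply List.map_congr_left
  intro k _
  simp only [Function.comp_apply]
  congr 1
  ring

def pvS1 : Int → Int := pvMirrorSum (fun t => t)
def pvS2 : Int → Int := pvMirrorSum pvS1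
def pvS3 : Int → Int := pvMirrorSum pvS2

theorem pvMirrorSum_neg (f : Int → Int) (s : Int) (hs : s ≤ 0) : pvMirrorSum f s = 0 := by
  unfold pvMirrorSum
  rw [PySem.List.pyRange_one_eq_nil (by omega)]; rfl

theorem pvS1_closed (n : Nat) : 2 * pvS1 (n : Int) = n * (n + 1) := by
  induction n with
  | zero => simp [pvS1, pvMirrorSum_neg _ 0 le_rfl]
  | succ m ih =>
    have : ((m + 1 : Nat) : Int) = (m : Int) + 1 := by push_cast; ring
    rw [this, pvS1, pvMirrorSum_step _ _ (by positivity)]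
    show 2 * (((m:Int) + 1) + pvS1 m) = _
    nlinarith [ih]

theorem pvS2_closed (n : Nat) : 6 * pvS2 (n : Int) = n * (n + 1) * (n + 2) := by
  induction n with
  | zero => simp [pvS2, pvMirrorSum_neg _ 0 le_rfl]
  | succ m ih =>
    have h1 : ((m + 1 : Nat) : Int) = (m : Int) + 1 := by push_cast; ring
    rw [h1, pvS2, pvMirrorSum_step _ _ (by positivity)]
    show 6 * (pvS1 ((m:Int)+1) + pvS2 m) = _
    have := pvS1_closed (m + 1)
    push_cast at this ⊢
    nlinarith [ih, this]

theorem pvS3_closed (n : Nat) : 24 * pvS3 (n : Int) = n * (n + 1) * (n + 2) * (n + 3) := by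
  induction n with
  | zero => simp [pvS3, pvMirrorSum_neg _ 0 le_rfl]
  | succ m ih =>
    have h1 : ((m + 1 : Nat) : Int) = (m : Int) + 1 := by push_cast; ring
    rw [h1, pvS3, pvMirrorSum_step _ _ (by positivity)]
    show 24 * (pvS2 ((m:Int)+1) + pvS3 m) = _
    have := pvS2_closed (m + 1)
    push_cast at this ⊢
    nlinarith [ih, this]

theorem pvA_eq_S3 (resistors : List Int) :
    count_dip_switch_networks_4 resistors = (resistors.length : Int) * pvS3 (resistors.length : Int) := by
  unfold count_dip_switch_networks_4
  set n : Int := (resistors.length : Int) with hn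
  simp only []
  congr 1
  -- flatten the three nested foldl's into nested mapped sums
  have inner : ∀ (i j c : Int),
      (PySem.List.pyRange 0 (n - j - i) 1).foldl (fun count k => count + (n - k - i - j)) c
        = c + pvS1 (n - i - j) := by
    intro i j c
    rw [PySem.List.foldl_add]
    congr 1
    unfold pvS1 pvMirrorSum
    have : n - j - i = n - i - j := by ring
    rw [this]
    apply congrArg
    apply List.map_congr_left
    intro k _
    show n - k - i - j = n - i - j - k
    ring
  have middle : ∀ (i c : Int),
      (PySem.List.pyRange 0 (n - i) 1).foldl (fun count j =>
        (PySem.List.pyRange 0 (n - j - i) 1).foldl (fun count k => count + (n - k - i - j)) count) c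
        = c + pvS2 (n - i) := by
    intro i c
    have : (fun (count j : Int) =>
        (PySem.List.pyRange 0 (n - j - i) 1).foldl (fun count k => count + (n - k - i - j)) count)
        = fun (count j : Int) => count + pvS1 ((n - i) - j) := by
      funext count j
      rw [inner i j count]
    rw [this, PySem.List.foldl_add]
    rfl
  have outer :
      (PySem.List.pyRange 0 n 1).foldl (fun count i =>
        (PySem.List.pyRange 0 (n - i) 1).foldl (fun count j =>
          (PySem.List.pyRange 0 (n - j - i) 1).foldl (fun count k => count + (n - k - i - j)) count) count) 0
        = pvS3 n := by
    have : (fun (count i : Int) =>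
        (PySem.List.pyRange 0 (n - i) 1).foldl (fun count j =>
          (PySem.List.pyRange 0 (n - j - i) 1).foldl (fun count k => count + (n - k - i - j)) count) count)
        = fun (count i : Int) => count + pvS2 (n - i) := by
      funext count i; exact middle i count
    rw [this, PySem.List.foldl_add, zero_add]
    rfl
  exact outer

-- ===== VERDICT (by name: the statement is the Claim_ definition above) =====
theorem count_dip_switch_networks_4_spec : Claim_equal_count_dip_switch_networks_4 := by
  intro resistors _
  unfold Spec_count_dip_switch_networks_4 count_dip_switch_networks_4_alt
  rw [pvA_eq_S3]
  set n : Int := (resistors.length : Int) with hn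
  simp only []
  congr 1
  have hc := pvS3_closed resistors.length
  rw [← hn] at hc
  rw [← hc, PySem.Int.floordiv_eq_ediv_of_pos (by norm_num)]
  omega
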